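-- pv_equiv track=rewrite | github.com/everysoftware/algorithms-course | src/prefix/implementation/subsequence_count.py | count_subsequence_naive
-- ===== SOURCE A (Python) =====
-- def count_subsequence_naive(k: int, a: list[int]) -> int:
--     """Перебор всех подпоследовательностей. Сложность O(N^2)"""
--     n = len(a)
--     count = 0
--
--     for i in range(n):
--         s = 0
--         for j in range(i, n):
--             s += a[j]
--             if s % k == 0 and j - i + 1 >= 5:
--                 count += 1
--
--     return count
-- ===== SOURCE B (Python) =====
-- def count_subsequence_naive(k: int, a: list[int]) -> int:
--     """Prefix-sum residues with a delayed window: a subarray a[i..j] of length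
--     >= 5 has sum divisible by k iff pref[j+1] and pref[i] share a residue mod k
--     and (j+1) - i >= 5.  One pass, O(N)."""
--     res = [0]
--     p = 0
--     for x in a:
--         p += x
--         res.append(p % k)
--     cnt = {}
--     count = 0
--     for j in range(5, len(a) + 1):
--         r_in = res[j - 5]
--         cnt[r_in] = cnt.get(r_in, 0) + 1
--         count += cnt.get(res[j], 0)
--     return count
-- ===== Notes on version B (the rewrite author's own statement) =====
-- stated objective: faster
-- what changed: Replaced the O(N^2) scan over all start/end pairs by a single pass over prefix-sum residues mod k: a residue counter is fed with a 5-step delay, so each right endpoint adds the number of compatible left endpoints in O(1).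
import Mathlib
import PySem

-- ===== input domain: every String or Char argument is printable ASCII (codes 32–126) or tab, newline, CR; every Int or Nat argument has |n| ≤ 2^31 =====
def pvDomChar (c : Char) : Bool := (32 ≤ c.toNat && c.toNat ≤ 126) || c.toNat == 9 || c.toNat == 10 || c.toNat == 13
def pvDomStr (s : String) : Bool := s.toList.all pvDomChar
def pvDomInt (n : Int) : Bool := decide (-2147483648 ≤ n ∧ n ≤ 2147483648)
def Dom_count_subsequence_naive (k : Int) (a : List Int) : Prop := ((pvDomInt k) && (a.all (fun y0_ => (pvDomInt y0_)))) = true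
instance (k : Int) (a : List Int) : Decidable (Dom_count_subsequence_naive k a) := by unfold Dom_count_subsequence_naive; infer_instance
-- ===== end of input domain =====

-- B replaces A's O(N^2) pair scan by one pass over prefix-sum residues mod k
-- with a counter fed with a 5-step delay (objective: faster).

-- ===== PORT A =====
def count_subsequence_naive (k : Int) (a : List Int) : Int :=
  let n : Int := (a.length : Int)
  (PySem.List.pyRange 0 n 1).foldl (fun count i =>
    ((PySem.List.pyRange i n 1).foldl (fun (sc : Int × Int) j =>
        let s := sc.1 + PySem.List.pyGetD a j 0
        (s, if PySem.Int.mod s k = 0 ∧ 5 ≤ j - i + 1 then sc.2 + 1 else sc.2))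
      (0, count)).2) 0

-- ===== PORT B =====
def count_subsequence_naive_alt (k : Int) (a : List Int) : Int :=
  let res := (a.foldl (fun (st : Int × List Int) x =>
      (st.1 + x, st.2 ++ [PySem.Int.mod (st.1 + x) k])) (0, [0])).2
  ((PySem.List.pyRange 5 ((a.length : Int) + 1) 1).foldl (fun (st : PySem.Dict Int Int × Int) j =>
      let rin := PySem.List.pyGetD res (j - 5) 0
      let cnt := st.1.insert rin (st.1.getD rin 0 + 1)
      (cnt, st.2 + cnt.getD (PySem.List.pyGetD res j 0) 0))
    (PySem.Dict.empty, 0)).2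

-- ===== PRECONDITION & SPEC =====
-- Python A raises ZeroDivisionError whenever k = 0 and a is non-empty (s % k is
-- evaluated for every inner j); so does B (p % k per element); it returns
-- normally on all other inputs.
def Pre_count_subsequence_naive (k : Int) (a : List Int) : Prop := k ≠ 0 ∨ a = []
instance (k : Int) (a : List Int) : Decidable (Pre_count_subsequence_naive k a) := by
  unfold Pre_count_subsequence_naive; infer_instance
def pvWitness_count_subsequence_naive : Int × List Int := (3, [1, 2, 3, 4, 5, 6])

def Spec_count_subsequence_naive (k : Int) (a : List Int) (out : Int) : Prop :=
  out = count_subsequence_naive_alt k a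
instance (k : Int) (a : List Int) (out : Int) : Decidable (Spec_count_subsequence_naive k a out) := by
  unfold Spec_count_subsequence_naive; infer_instance

-- ===== CLAIM (what is proved, stated in full; the proofs are below) =====
def Claim_equal_count_subsequence_naive : Prop := ∀ (k : Int) (a : List Int), Dom_count_subsequence_naive k a → Pre_count_subsequence_naive k a → Spec_count_subsequence_naive k a (count_subsequence_naive k a)

-- ===== LEMMAS AND PROOFS =====

-- prefix sum of the first i elements of a
def pvP (a : List Int) (i : Nat) : Int := (a.take i).sum

-- indicator of a counted pair: subarray a[I..J) has length ≥ 5 and sum divisible by k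
def pvF (k : Int) (a : List Int) (I J : Nat) : Nat :=
  if k ∣ (pvP a J - pvP a I) ∧ I + 5 ≤ J then 1 else 0

theorem pv_mod_zero (x : Int) : PySem.Int.mod x 0 = x := by
  have h := PySem.Int.floordiv_mul_add_mod x 0
  omega

theorem pv_zero_mod (k : Int) : PySem.Int.mod 0 k = 0 :=
  (PySem.Int.mod_eq_zero_iff_dvd 0 k).mpr (dvd_zero k)

theorem pv_mod_eq_iff (k x y : Int) :
    PySem.Int.mod x k = PySem.Int.mod y k ↔ k ∣ (x - y) := by
  rcases eq_or_ne k 0 with rfl | hk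
  · simp [pv_mod_zero]
    omega
  · have hx := PySem.Int.floordiv_mul_add_mod x k
    have hy := PySem.Int.floordiv_mul_add_mod y k
    constructor
    · intro h
      exact ⟨PySem.Int.floordiv x k - PySem.Int.floordiv y k, by linarith [hx, hy]⟩
    · intro hdvd
      have hd : k ∣ (PySem.Int.mod x k - PySem.Int.mod y k) := by
        have hrepr : x - y = (PySem.Int.floordiv x k - PySem.Int.floordiv y k) * k +
            (PySem.Int.mod x k - PySem.Int.mod y k) := by linarith [hx, hy]
        have h2 : k ∣ (x - y) - (PySem.Int.floordiv x k - PySem.Int.floordiv y k) * k :=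
          dvd_sub hdvd (dvd_mul_left k _)
        simpa [hrepr] using h2
      have hb : |PySem.Int.mod x k - PySem.Int.mod y k| < |k| := by
        rw [abs_sub_lt_iff]
        rcases lt_or_gt_of_ne hk with hneg | hpos
        · have b1 := PySem.Int.mod_neg_bounds x hneg
          have b2 := PySem.Int.mod_neg_bounds y hneg
          rw [abs_of_neg hneg]
          omega
        · have b1 := PySem.Int.mod_nonneg x hpos
          have b2 := PySem.Int.mod_lt x hpos
          have b3 := PySem.Int.mod_nonneg y hpos
          have b4 := PySem.Int.mod_lt y hpos
          rw [abs_of_pos hpos]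
          omega
      have := Int.eq_zero_of_abs_lt_dvd ((abs_dvd k _).mpr hd) hb
      omega

theorem pv_countP_range (m : Nat) (p : Nat → Bool) :
    (List.range m).countP p = ∑ x ∈ Finset.range m, (if p x then 1 else 0) := by
  induction m with
  | zero => simp
  | succ m ih =>
      rw [Finset.sum_range_succ, ← ih, List.range_succ, List.countP_append, List.countP_cons]
      simp

theorem pv_sum_map_cast (m : Nat) (g : Nat → Nat) :
    ((List.range m).map (fun i => ((g i : Nat) : Int))).sum
    = ((∑ i ∈ Finset.range m, g i : Nat) : Int) := by
  induction m with
  | zero => simp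
  | succ m ih =>
      rw [Finset.sum_range_succ, List.range_succ, List.map_append, List.sum_append, ih]
      push_cast
      simp

-- A's inner loop over j ∈ [i, i+t): running sum and conditional count
theorem pv_innerA (k : Int) (a : List Int) (i t : Nat) (h : i + t ≤ a.length) (c0 : Int) :
    (PySem.List.pyRange (i : Int) ((i : Int) + (t : Int)) 1).foldl
      (fun (sc : Int × Int) j =>
        let s := sc.1 + PySem.List.pyGetD a j 0
        (s, if PySem.Int.mod s k = 0 ∧ 5 ≤ j - (i : Int) + 1 then sc.2 + 1 else sc.2))
      (0, c0)
    = (pvP a (i + t) - pvP a i,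
       c0 + (((List.range t).countP (fun u =>
          (PySem.Int.mod (pvP a (i + u + 1) - pvP a i) k == 0) && decide (4 ≤ u)) : Nat) : Int)) := by
  induction t with
  | zero => simp [PySem.List.pyRange_one_eq_nil (le_refl (i : Int))]
  | succ t ih =>
    have h' : i + t ≤ a.length := by omega
    have hle : (i : Int) ≤ (i : Int) + (t : Int) := by omega
    have hcast : (i : Int) + ((t : Nat) + 1 : Nat) = ((i : Int) + (t : Int)) + 1 := by
      push_cast; ring
    rw [hcast, PySem.List.pyRange_one_succ_right hle, List.foldl_append, ih h']
    have hidx : (i : Int) + (t : Int) = ((i + t : Nat) : Int) := by push_cast; ring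
    have hget : PySem.List.pyGetD a ((i : Int) + (t : Int)) 0 = a[i + t]'(by omega) := by
      rw [hidx, PySem.List.pyGetD_natCast]
      exact List.getD_eq_getElem a 0 (by omega)
    simp only [List.foldl_cons, List.foldl_nil]
    have hsum : pvP a (i + t) - pvP a i + PySem.List.pyGetD a ((i : Int) + (t : Int)) 0
        = pvP a (i + t + 1) - pvP a i := by
      rw [hget]
      have := List.sum_take_succ a (i + t) (by omega)
      unfold pvP at *
      omega
    have hcond : (5 ≤ ((i : Int) + (t : Int)) - (i : Int) + 1) ↔ (4 ≤ t) := by omega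
    rw [List.range_succ, List.countP_append, List.countP_cons]
    simp only [hsum, hcond, List.countP_nil]
    rw [Prod.mk.injEq]
    refine ⟨by rw [Nat.add_assoc], ?_⟩
    simp only [Bool.and_eq_true, beq_iff_eq, decide_eq_true_eq]
    split_ifs <;> push_cast <;> ring

-- A's row i as a column of the pair indicator
theorem pv_rowA (k : Int) (a : List Int) (i : Nat) (hi : i ≤ a.length) :
    (List.range (a.length - i)).countP (fun u =>
        (PySem.Int.mod (pvP a (i + u + 1) - pvP a i) k == 0) && decide (4 ≤ u))
    = ∑ J ∈ Finset.range (a.length + 1), pvF k a i J := by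
  have h1 : ∑ J ∈ Finset.Ico 0 (i + 1), pvF k a i J = 0 := by
    apply Finset.sum_eq_zero
    intro J hJ
    rw [Finset.mem_Ico] at hJ
    exact if_neg (by omega)
  have h2 : a.length + 1 - (i + 1) = a.length - i := by omega
  have hR : ∑ J ∈ Finset.range (a.length + 1), pvF k a i J
      = ∑ u ∈ Finset.range (a.length - i), pvF k a i (i + 1 + u) := by
    rw [Finset.range_eq_Ico, ← Finset.sum_Ico_consecutive (fun J => pvF k a i J)
      (Nat.zero_le (i + 1)) (by omega), h1, zero_add, Finset.sum_Ico_eq_sum_range, h2,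
      ← Finset.range_eq_Ico]
  rw [hR, pv_countP_range]
  apply Finset.sum_congr rfl
  intro u hu
  rw [Finset.mem_range] at hu
  have hidx : i + 1 + u = i + u + 1 := by omega
  rw [pvF, hidx]
  by_cases hd : k ∣ (pvP a (i + u + 1) - pvP a i)
  · have hm : PySem.Int.mod (pvP a (i + u + 1) - pvP a i) k = 0 :=
      (PySem.Int.mod_eq_zero_iff_dvd _ _).mpr hd
    by_cases h4 : 4 ≤ u <;> simp [hm, hd, h4]
  · have hm : ¬ PySem.Int.mod (pvP a (i + u + 1) - pvP a i) k = 0 := by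
      intro h; exact hd ((PySem.Int.mod_eq_zero_iff_dvd _ _).mp h)
    simp [hm, hd]

-- A equals the row-major double count of pairs
theorem pv_A_total (k : Int) (a : List Int) :
    count_subsequence_naive k a
    = ((∑ i ∈ Finset.range (a.length + 1), ∑ J ∈ Finset.range (a.length + 1), pvF k a i J : Nat) : Int) := by
  unfold count_subsequence_naive
  simp only []
  rw [PySem.List.pyRange_zero_nat, List.foldl_map]
  rw [PySem.List.foldl_congr_mem (List.range a.length) _
    (fun count (i : Nat) => count + ((∑ J ∈ Finset.range (a.length + 1), pvF k a i J : Nat) : Int)) 0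
    (by
      intro acc i hi
      rw [List.mem_range] at hi
      have hc : (i : Int) + ((a.length - i : Nat) : Int) = ((a.length : Nat) : Int) := by
        push_cast [Nat.cast_sub (le_of_lt hi)]; ring
      rw [← hc, pv_innerA k a i (a.length - i) (by omega) acc]
      simp only []
      rw [pv_rowA k a i (le_of_lt hi)])]
  rw [PySem.List.foldl_add, zero_add]
  rw [Finset.sum_range_succ]
  have hlast : ∑ J ∈ Finset.range (a.length + 1), pvF k a a.length J = 0 := by
    apply Finset.sum_eq_zero
    intro J hJ
    rw [Finset.mem_range] at hJ
    exact if_neg (by omega)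
  rw [hlast, Nat.add_zero]
  exact pv_sum_map_cast a.length _

-- B's residue-list construction
theorem pv_res_fold (k : Int) (a : List Int) : ∀ (p : Int) (l : List Int),
    (a.foldl (fun (st : Int × List Int) x =>
        (st.1 + x, st.2 ++ [PySem.Int.mod (st.1 + x) k])) (p, l))
    = (p + a.sum,
       l ++ (List.range a.length).map (fun m => PySem.Int.mod (p + (a.take (m + 1)).sum) k)) := by
  induction a with
  | nil => intro p l; simp
  | cons x rest ih =>
      intro p l
      rw [List.foldl_cons, ih (p + x) (l ++ [PySem.Int.mod (p + x) k])]
      simp only [List.sum_cons, List.length_cons, List.range_succ_eq_map, List.map_cons,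
        List.map_map, List.append_assoc, List.singleton_append, Prod.mk.injEq]
      refine ⟨by ring, ?_⟩
      congr 1
      refine List.cons_eq_cons.mpr ⟨by simp, ?_⟩
      apply List.map_congr_left
      intro m _
      simp only [Function.comp_apply, List.take_succ_cons, List.sum_cons]
      rw [← add_assoc]

theorem pv_res_eq (k : Int) (a : List Int) :
    (a.foldl (fun (st : Int × List Int) x =>
        (st.1 + x, st.2 ++ [PySem.Int.mod (st.1 + x) k])) (0, [0])).2
    = (List.range (a.length + 1)).map (fun t => PySem.Int.mod (pvP a t) k) := by
  rw [pv_res_fold k a 0 [0]]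
  simp only [List.range_succ_eq_map, List.map_cons, List.map_map]
  rw [List.singleton_append]
  refine List.cons_eq_cons.mpr ⟨?_, ?_⟩
  · simp [pvP, pv_zero_mod]
  · apply List.map_congr_left
    intro m _
    simp [pvP, Function.comp]

theorem pv_res_get (k : Int) (a : List Int) (t : Nat) (ht : t ≤ a.length) :
    PySem.List.pyGetD
      ((a.foldl (fun (st : Int × List Int) x =>
          (st.1 + x, st.2 ++ [PySem.Int.mod (st.1 + x) k])) (0, [0])).2)
      (t : Int) 0 = PySem.Int.mod (pvP a t) k := by
  rw [pv_res_eq, PySem.List.pyGetD_natCast, PySem.List.getD_map_range _ _ _ _ (by omega)]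

-- B's loop invariant: residue counter of the first t prefixes, delayed count
theorem pv_Binv (k : Int) (a : List Int) (t : Nat) (h : 5 + t ≤ a.length + 1) :
    (PySem.List.pyRange 5 (5 + (t : Int)) 1).foldl (fun (st : PySem.Dict Int Int × Int) j =>
      let res := (a.foldl (fun (st : Int × List Int) x =>
          (st.1 + x, st.2 ++ [PySem.Int.mod (st.1 + x) k])) (0, [0])).2
      let rin := PySem.List.pyGetD res (j - 5) 0
      let cnt := st.1.insert rin (st.1.getD rin 0 + 1)
      (cnt, st.2 + cnt.getD (PySem.List.pyGetD res j 0) 0))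
    (PySem.Dict.empty, 0)
    = (((List.range t).map (fun u => PySem.Int.mod (pvP a u) k)).foldl
         (fun d r => d.insert r (d.getD r 0 + 1)) PySem.Dict.empty,
       ∑ u ∈ Finset.range t,
         ((((List.range (u + 1)).map (fun I => PySem.Int.mod (pvP a I) k)).count
             (PySem.Int.mod (pvP a (u + 5)) k) : Nat) : Int)) := by
  induction t with
  | zero => simp [PySem.List.pyRange_one_eq_nil (le_refl (5 : Int))]
  | succ t ih =>
      have h' : 5 + t ≤ a.length + 1 := by omega
      have hcast : (5 : Int) + ((t + 1 : Nat) : Int) = (5 + (t : Int)) + 1 := by push_cast; ring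
      rw [hcast, PySem.List.pyRange_one_succ_right (by omega), List.foldl_append, ih h']
      simp only [List.foldl_cons, List.foldl_nil]
      have hg1 : PySem.List.pyGetD
          ((a.foldl (fun (st : Int × List Int) x =>
              (st.1 + x, st.2 ++ [PySem.Int.mod (st.1 + x) k])) (0, [0])).2)
          ((5 + (t : Int)) - 5) 0 = PySem.Int.mod (pvP a t) k := by
        have hc : (5 + (t : Int)) - 5 = (t : Int) := by ring
        rw [hc, pv_res_get k a t (by omega)]
      have hg2 : PySem.List.pyGetD
          ((a.foldl (fun (st : Int × List Int) x =>
              (st.1 + x, st.2 ++ [PySem.Int.mod (st.1 + x) k])) (0, [0])).2)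
          (5 + (t : Int)) 0 = PySem.Int.mod (pvP a (t + 5)) k := by
        have hc : (5 + (t : Int)) = ((t + 5 : Nat) : Int) := by push_cast; ring
        rw [hc, pv_res_get k a (t + 5) (by omega)]
      simp only [hg1, hg2]
      rw [Prod.mk.injEq]
      constructor
      · rw [List.range_succ, List.map_append, List.foldl_append]
        simp
      · rw [Finset.sum_range_succ]
        congr 1
        rw [PySem.Dict.getD_insert]
        split_ifs with hr
        · rw [PySem.Dict.getD_foldl_insert_add_one, List.range_succ, List.map_append,
            List.count_append]
          simp [hr]
        · rw [PySem.Dict.getD_foldl_insert_add_one, List.range_succ, List.map_append,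
            List.count_append]
          simp [List.count_cons]
          exact fun hx => hr hx.symm

-- B's per-step count as a row of the pair indicator
theorem pv_colB (k : Int) (a : List Int) (u : Nat) (hu : u + 5 ≤ a.length) :
    ((List.range (u + 1)).map (fun I => PySem.Int.mod (pvP a I) k)).count
        (PySem.Int.mod (pvP a (u + 5)) k)
    = ∑ I ∈ Finset.range (a.length + 1), pvF k a I (u + 5) := by
  have hzero : ∑ I ∈ Finset.Ico (u + 1) (a.length + 1), pvF k a I (u + 5) = 0 := by
    apply Finset.sum_eq_zero
    intro I hI
    rw [Finset.mem_Ico] at hI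
    exact if_neg (by omega)
  have hsplit : ∑ I ∈ Finset.range (a.length + 1), pvF k a I (u + 5)
      = ∑ I ∈ Finset.range (u + 1), pvF k a I (u + 5) := by
    rw [Finset.range_eq_Ico, ← Finset.sum_Ico_consecutive (fun I => pvF k a I (u + 5))
      (Nat.zero_le (u + 1)) (by omega), hzero, add_zero, ← Finset.range_eq_Ico]
  rw [hsplit, List.count_eq_countP, List.countP_map, pv_countP_range]
  apply Finset.sum_congr rfl
  intro I hI
  rw [Finset.mem_range] at hI
  rw [pvF]
  by_cases hd : k ∣ (pvP a (u + 5) - pvP a I)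
  · have hm : PySem.Int.mod (pvP a I) k = PySem.Int.mod (pvP a (u + 5)) k :=
      (pv_mod_eq_iff k _ _).mpr (dvd_sub_comm.mp hd)
    simp [Function.comp, hm, hd]
    omega
  · have hm : ¬ PySem.Int.mod (pvP a I) k = PySem.Int.mod (pvP a (u + 5)) k := by
      intro h
      exact hd (dvd_sub_comm.mp ((pv_mod_eq_iff k _ _).mp h))
    simp [Function.comp, hm, hd]

theorem pv_sum_shift (g : Nat → Nat) (n : Nat) (hn : 4 ≤ n) (h0 : ∀ J, J < 5 → g J = 0) :
    ∑ J ∈ Finset.range (n + 1), g J = ∑ u ∈ Finset.range (n - 4), g (5 + u) := by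
  rw [Finset.range_eq_Ico, ← Finset.sum_Ico_consecutive g (Nat.zero_le 5) (by omega)]
  have hlow : ∑ J ∈ Finset.Ico 0 5, g J = 0 := by
    apply Finset.sum_eq_zero
    intro J hJ
    rw [Finset.mem_Ico] at hJ
    exact h0 J (by omega)
  rw [hlow, zero_add, Finset.sum_Ico_eq_sum_range]
  have hlen : n + 1 - 5 = n - 4 := by omega
  rw [hlen, ← Finset.range_eq_Ico]

-- B equals the column-major double count of pairs
theorem pv_B_total (k : Int) (a : List Int) :
    count_subsequence_naive_alt k a
    = ((∑ J ∈ Finset.range (a.length + 1), ∑ I ∈ Finset.range (a.length + 1), pvF k a I J : Nat) : Int) := by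
  unfold count_subsequence_naive_alt
  simp only []
  by_cases hn : 4 ≤ a.length
  · have hc : ((a.length : Int) + 1) = 5 + ((a.length - 4 : Nat) : Int) := by
      push_cast [Nat.cast_sub hn]; ring
    rw [hc, pv_Binv k a (a.length - 4) (by omega)]
    simp only []
    have hstep : ∀ u ∈ Finset.range (a.length - 4),
        ((((List.range (u + 1)).map (fun I => PySem.Int.mod (pvP a I) k)).count
            (PySem.Int.mod (pvP a (u + 5)) k) : Nat) : Int)
        = ((∑ I ∈ Finset.range (a.length + 1), pvF k a I (u + 5) : Nat) : Int) := by
      intro u hu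
      rw [Finset.mem_range] at hu
      rw [pv_colB k a u (by omega)]
    rw [Finset.sum_congr rfl hstep]
    have hcol0 : ∀ J, J < 5 → ∑ I ∈ Finset.range (a.length + 1), pvF k a I J = 0 := by
      intro J hJ
      apply Finset.sum_eq_zero
      intro I _
      exact if_neg (by omega)
    rw [pv_sum_shift (fun J => ∑ I ∈ Finset.range (a.length + 1), pvF k a I J) a.length hn hcol0]
    rw [Nat.cast_sum]
    apply Finset.sum_congr rfl
    intro u _
    rw [Nat.add_comm 5 u]
  · have hnil : PySem.List.pyRange 5 ((a.length : Int) + 1) 1 = [] :=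
      PySem.List.pyRange_one_eq_nil (by omega)
    rw [hnil]
    have hz : ∑ J ∈ Finset.range (a.length + 1), ∑ I ∈ Finset.range (a.length + 1), pvF k a I J = 0 := by
      apply Finset.sum_eq_zero
      intro J hJ
      apply Finset.sum_eq_zero
      intro I _
      rw [Finset.mem_range] at hJ
      exact if_neg (by omega)
    rw [hz]
    simp

-- ===== VERDICT (by name: the statement is the Claim_ definition above) =====
theorem count_subsequence_naive_spec : Claim_equal_count_subsequence_naive := by
  unfold Claim_equal_count_subsequence_naive
  intro k a _ _
  unfold Spec_count_subsequence_naive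
  rw [pv_A_total, pv_B_total]
  exact congrArg _ Finset.sum_comm
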